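-- pv_equiv track=rewrite | github.com/durgirajesh/Codeforces | v2/Startup.py | start_up
-- ===== SOURCE A (Python) =====
-- from collections import defaultdict
--
-- def start_up(nums, n, k) :
--     container = defaultdict(int)
--     for brand, cost in nums :
--         container[brand] += cost
--
--     max_cost = 0
--     costs = []
--
--     for brand in container :
--         costs.append(container[brand])
--
--     costs.sort(reverse=True)
--     max_cost = sum(costs[ : n])
--     return max_cost
-- ===== SOURCE B (Python) =====
-- from collections import defaultdict
--
-- def start_up(nums, n, k):
--     totals = defaultdict(int)
--     for brand, cost in nums:
--         totals[brand] += cost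
--     top = []  # ascending buffer of the n largest totals seen so far
--     for v in totals.values():
--         i = 0
--         while i < len(top) and top[i] < v:
--             i += 1
--         top.insert(i, v)
--         if len(top) > n:
--             del top[0]
--     return sum(top)
-- ===== Notes on version B (the rewrite author's own statement) =====
-- stated objective: alternative
-- what changed: Instead of fully sorting all per-brand totals descending and slicing costs[:n], B makes one pass over the totals maintaining a size-capped ascending buffer holding only the n largest seen so far, then sums the buffer; Pre_ excludes negative n (outside the natural 'top-n count' domain), where A's value is an accident of Python's negative-slice semantics.
-- outside the precondition, e.g. on start_up([(1, 5), (2, 3)], -1, 0): A returns 5, B returns 0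
import Mathlib
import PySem

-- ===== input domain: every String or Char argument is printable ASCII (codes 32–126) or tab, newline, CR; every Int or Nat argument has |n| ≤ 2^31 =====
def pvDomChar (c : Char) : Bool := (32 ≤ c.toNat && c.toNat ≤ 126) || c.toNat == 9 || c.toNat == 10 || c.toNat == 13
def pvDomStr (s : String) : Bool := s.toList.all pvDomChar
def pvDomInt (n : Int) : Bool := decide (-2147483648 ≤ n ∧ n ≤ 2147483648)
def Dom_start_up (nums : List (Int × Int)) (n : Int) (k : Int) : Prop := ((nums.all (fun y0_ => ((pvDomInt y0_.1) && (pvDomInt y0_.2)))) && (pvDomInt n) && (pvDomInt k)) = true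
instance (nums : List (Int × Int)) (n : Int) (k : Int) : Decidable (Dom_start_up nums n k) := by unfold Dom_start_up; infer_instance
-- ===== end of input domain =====

-- B replaces A's full descending sort + slice of costs[:n] by a single pass over the
-- per-brand totals maintaining a size-capped ascending buffer of the n largest totals
-- (alternative decomposition, similar cost).

-- ===== PORT A =====
def start_up (nums : List (Int × Int)) (n : Int) (k : Int) : Int :=
  let container := nums.foldl (fun d p => d.modify p.1 0 (· + p.2)) (PySem.Dict.empty : PySem.Dict Int Int)
  let costs := container.keys.foldl (fun acc brand => acc ++ [container.getD brand 0]) ([] : List Int)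
  let costs := PySem.List.sorted costs (fun x => x) true
  (PySem.List.slice costs none (some n)).sum

-- ===== PORT B =====
-- Source B's inner while-loop + list.insert(i, v): insert v into the ascending buffer at the
-- leftmost position whose element is not < v
def pvInsAsc : List Int → Int → List Int
  | [], v => [v]
  | a :: t, v => if a < v then a :: pvInsAsc t v else v :: a :: t

def start_up_alt (nums : List (Int × Int)) (n : Int) (k : Int) : Int :=
  let totals := nums.foldl (fun d p => d.modify p.1 0 (· + p.2)) (PySem.Dict.empty : PySem.Dict Int Int)
  (totals.values.foldl (fun top v =>
      let t' := pvInsAsc top v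
      if (t'.length : Int) > n then t'.tail else t') ([] : List Int)).sum

-- ===== PRECONDITION & SPEC =====
-- Pre_ excludes negative n (A returns a value there: the sum of all but the |n| smallest
-- totals, an accident of Python's negative-slice semantics of costs[:n]); a top-n count
-- is naturally nonnegative, and B's buffer returns 0 there instead.
def Pre_start_up (nums : List (Int × Int)) (n : Int) (k : Int) : Prop := 0 ≤ n
instance (nums : List (Int × Int)) (n : Int) (k : Int) : Decidable (Pre_start_up nums n k) := by unfold Pre_start_up; infer_instance
def pvWitness_start_up : (List (Int × Int)) × Int × Int := ([(1, 2), (1, 3), (2, 4)], 2, 0)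

def Spec_start_up (nums : List (Int × Int)) (n : Int) (k : Int) (out : Int) : Prop := out = start_up_alt nums n k
instance (nums : List (Int × Int)) (n : Int) (k : Int) (out : Int) : Decidable (Spec_start_up nums n k out) := by unfold Spec_start_up; infer_instance

-- ===== CLAIM (what is proved, stated in full; the proofs are below) =====
def Claim_equal_start_up : Prop := ∀ (nums : List (Int × Int)) (n : Int) (k : Int), Dom_start_up nums n k → Pre_start_up nums n k → Spec_start_up nums n k (start_up nums n k)

-- ===== LEMMAS AND PROOFS =====

theorem pvInsAsc_perm (l : List Int) (v : Int) : (pvInsAsc l v).Perm (v :: l) := by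
  induction l with
  | nil => simp [pvInsAsc]
  | cons a t ih =>
    by_cases h : a < v
    · simpa [pvInsAsc, h] using ((ih.cons a).trans (List.Perm.swap v a t))
    · simp [pvInsAsc, h]

theorem pvInsAsc_length (l : List Int) (v : Int) : (pvInsAsc l v).length = l.length + 1 :=
  (pvInsAsc_perm l v).length_eq

theorem mem_pvInsAsc {x : Int} {l : List Int} {v : Int} :
    x ∈ pvInsAsc l v ↔ x = v ∨ x ∈ l := by
  rw [(pvInsAsc_perm l v).mem_iff]; simp

theorem pvInsAsc_pairwise {l : List Int} (h : l.Pairwise (· ≤ ·)) (v : Int) :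
    (pvInsAsc l v).Pairwise (· ≤ ·) := by
  induction l with
  | nil => simp [pvInsAsc]
  | cons a t ih =>
    rcases List.pairwise_cons.mp h with ⟨ha, ht⟩
    by_cases hav : a < v
    · rw [pvInsAsc, if_pos hav]
      refine List.pairwise_cons.mpr ⟨?_, ih ht⟩
      intro x hx
      rcases mem_pvInsAsc.mp hx with rfl | hx
      · exact le_of_lt hav
      · exact ha x hx
    · rw [pvInsAsc, if_neg hav]
      refine List.pairwise_cons.mpr ⟨?_, h⟩
      intro x hx
      rcases List.mem_cons.mp hx with rfl | hx
      · omega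
      · exact le_trans (by omega) (ha x hx)

-- Source B's ghost sort: folding pvInsAsc is insertion sort
theorem foldl_pvInsAsc_perm (xs : List Int) : ∀ l : List Int, (xs.foldl pvInsAsc l).Perm (l ++ xs) := by
  induction xs with
  | nil => simp
  | cons x xs ih =>
    intro l
    simp only [List.foldl_cons]
    exact (ih (pvInsAsc l x)).trans (((pvInsAsc_perm l x).append_right xs).trans List.perm_middle.symm)

theorem foldl_pvInsAsc_pairwise (xs : List Int) :
    ∀ l : List Int, l.Pairwise (· ≤ ·) → (xs.foldl pvInsAsc l).Pairwise (· ≤ ·) := by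
  induction xs with
  | nil => intro l h; simpa using h
  | cons x xs ih => intro l h; exact ih _ (pvInsAsc_pairwise h x)

-- dropping in front commutes with inserting, on a sorted list
theorem tail_pvInsAsc_drop (v : Int) :
    ∀ (l : List Int), l.Pairwise (· ≤ ·) → ∀ k : Nat,
      (pvInsAsc (l.drop k) v).tail = (pvInsAsc l v).drop (k + 1) := by
  intro l
  induction l with
  | nil => intro _ k; simp [pvInsAsc]
  | cons a t ih =>
    intro hl k
    cases k with
    | zero => simp
    | succ j =>
      rcases List.pairwise_cons.mp hl with ⟨ha, ht⟩
      by_cases hav : a < v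
      · rw [List.drop_succ_cons, ih ht j, pvInsAsc, if_pos hav, List.drop_succ_cons]
      · rw [List.drop_succ_cons, pvInsAsc, if_neg hav, List.drop_succ_cons, List.drop_succ_cons]
        -- every element of t.drop j is ≥ a ≥ v, so pvInsAsc puts v in front
        cases hdj : t.drop j with
        | nil => simp [pvInsAsc]
        | cons b r =>
          have hb : b ∈ t := List.mem_of_mem_drop (hdj ▸ List.mem_cons_self)
          have hbv : ¬ b < v := by have := ha b hb; omega
          simp [pvInsAsc, hbv]

-- one step of Source B's capped-buffer loop, against the ghost sorted list
theorem pv_step (m : Nat) (l : List Int) (hl : l.Pairwise (· ≤ ·)) (v : Int) :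
    (if ((pvInsAsc (l.drop (l.length - m)) v).length : Int) > (m : Int)
       then (pvInsAsc (l.drop (l.length - m)) v).tail
       else pvInsAsc (l.drop (l.length - m)) v)
    = (pvInsAsc l v).drop ((pvInsAsc l v).length - m) := by
  simp only [pvInsAsc_length, List.length_drop]
  by_cases hlen : l.length < m
  · have h1 : l.length - m = 0 := by omega
    have h2 : l.length + 1 - m = 0 := by omega
    rw [h1, h2, List.drop_zero, List.drop_zero, if_neg (by omega)]
  · have h3 : l.length - (l.length - m) = m := by omega
    have h2 : l.length + 1 - m = l.length - m + 1 := by omega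
    rw [h3, h2, if_pos (by omega), tail_pvInsAsc_drop v l hl]

-- the whole loop: Source B's buffer is the top-m suffix of the sorted prefix
theorem pv_loop (m : Nat) (xs : List Int) :
    ∀ l : List Int, l.Pairwise (· ≤ ·) →
      (xs.foldl (fun top v =>
          let t' := pvInsAsc top v
          if ((t'.length : Int)) > (m : Int) then t'.tail else t') (l.drop (l.length - m)))
      = (xs.foldl pvInsAsc l).drop ((xs.foldl pvInsAsc l).length - m) := by
  induction xs with
  | nil => intro l _; simp
  | cons x xs ih =>
    intro l hl
    simp only [List.foldl_cons]
    rw [pv_step m l hl x, ih (pvInsAsc l x) (pvInsAsc_pairwise hl x)]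

-- A's descending sort is the reverse of the ghost ascending insertion sort
theorem sorted_desc_eq_reverse (xs : List Int) :
    PySem.List.sorted xs (fun x => x) true = (xs.foldl pvInsAsc []).reverse := by
  have hascp : (xs.foldl pvInsAsc []).Perm xs := by simpa using foldl_pvInsAsc_perm xs []
  have hp : ((PySem.List.sorted xs (fun x => x) true).reverse).Perm (xs.foldl pvInsAsc []) :=
    ((List.reverse_perm _).trans (PySem.List.sorted_perm xs (fun x => x) true)).trans hascp.symm
  have h := PySem.List.eq_of_perm_of_pairwise_le_of_injective (fun x : Int => x)
      (fun _ _ h => h)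
      (l₁ := (PySem.List.sorted xs (fun x => x) true).reverse)
      (l₂ := xs.foldl pvInsAsc [])
      hp
      (by
        rw [List.pairwise_reverse]
        exact PySem.List.sorted_pairwise_rev xs (fun x => x))
      (foldl_pvInsAsc_pairwise xs [] (by simp))
  calc PySem.List.sorted xs (fun x => x) true
      = ((PySem.List.sorted xs (fun x => x) true).reverse).reverse := by rw [List.reverse_reverse]
    _ = (xs.foldl pvInsAsc []).reverse := by rw [h]

-- the slice a[:n] of the descending sort, for 0 ≤ n, equals Source B's capped-buffer sum
theorem main_core (vals : List Int) (n : Int) (hn : 0 ≤ n) :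
    (PySem.List.slice (PySem.List.sorted vals (fun x => x) true) none (some n)).sum
    = (vals.foldl (fun top v =>
          let t' := pvInsAsc top v
          if (t'.length : Int) > n then t'.tail else t') ([] : List Int)).sum := by
  set S := PySem.List.sorted vals (fun x => x) true with hS
  set asc := vals.foldl pvInsAsc [] with hasc
  have hrev : S = asc.reverse := sorted_desc_eq_reverse vals
  have hlasc : asc.length = vals.length := by
    simpa using (foldl_pvInsAsc_perm vals []).length_eq
  have hcast : n = (n.toNat : Int) := by omega
  rw [PySem.List.slice_to _ hn]
  have hloop := pv_loop n.toNat vals [] (by simp)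
  simp only [List.length_nil, Nat.zero_sub, List.drop_nil] at hloop
  rw [hrev, List.take_reverse, hlasc]
  rw [hcast, hloop, ← hasc]
  rw [List.sum_reverse]
  rw [Int.toNat_natCast, hlasc]

theorem start_up_spec : Claim_equal_start_up := by
  intro nums n k _ hn
  unfold Spec_start_up
  simp only [start_up, start_up_alt]
  set d := nums.foldl (fun d p => d.modify p.1 0 (· + p.2)) (PySem.Dict.empty : PySem.Dict Int Int) with hd
  have hnd : d.keys.Nodup := by
    rw [hd]
    exact PySem.Dict.nodup_keys_foldl_modify_key nums Prod.fst 0 (fun _ p => (· + p.2)) _ PySem.Dict.nodup_keys_empty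
  have hvals : d.keys.map (fun b => d.getD b 0) = d.values :=
    (PySem.Dict.values_eq_map_keys d hnd 0).symm
  rw [PySem.List.foldl_append_singleton_eq_map, List.nil_append, hvals]
  exact main_core d.values n hn
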